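-- pv_equiv track=rewrite | github.com/RodrigoVintem/Projeto_2 | FP2324P2.py | obtem_territorios_vazios
-- ===== SOURCE A (Python) =====
-- def vizinhas(i, j):
--     # Esta função retorna as coordenadas das interseções vizinhas
--     # a partir das coordenadas (i, j).
--     return [
--         (i - 1, j),  # Interseção acima
--         (i + 1, j),  # Interseção abaixo
--         (i, j - 1),  # Interseção à esquerda
--         (i, j + 1),  # Interseção à direita
--     ]
--
-- def busca_territorio(i, j, terr, g):
--             if (
--                 i < 0 or i >= len(g) or
--                 j < 0 or j >= len(g[0]) or
--                 g[i][j] != 2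
--             ):
--              return
--
--
--             terr.add((chr(j + 65), len(g) - i))
--             g[i][j] = 3  # Marca a interseção como visitada
--
--             for ni, nj in vizinhas(i, j):
--                 busca_territorio(ni, nj, terr, g)
--
-- def obtem_territorios_vazios(g):
--
--         territorios = []
--         for i in range(len(g)):
--             for j in range(len(g[i])):
--                 if g[i][j] == 2:
--                     terr = set()
--                     busca_territorio(i, j, terr, g)
--                     if terr:
--                         territorios.append(tuple(sorted(terr)))
--
--         # Restaura o estado original das interseções
--         for i in range(len(g)):
--             for j in range(len(g[i])):
--                 if g[i][j] == 3:
--                     g[i][j] = 2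
--
--         return tuple(sorted(territorios, key=lambda terr: (terr[0][1], terr[0][0])))
-- ===== SOURCE B (Python) =====
-- def obtem_territorios_vazios(g):
--     # Iterative flood fill with an explicit stack instead of A's recursive helper.
--     # Like A, this mutates g in place while scanning (marks 3, restores to 2 at the
--     # end, which also turns any pre-existing 3 into 2) -- same side effect as A.
--     territorios = []
--     for i in range(len(g)):
--         for j in range(len(g[i])):
--             if g[i][j] != 2:
--                 continue
--             terr = set()
--             stack = [(i, j)]
--             while stack:
--                 ci, cj = stack.pop()
--                 if 0 <= ci < len(g) and 0 <= cj < len(g[0]) and g[ci][cj] == 2: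
--                     terr.add((chr(cj + 65), len(g) - ci))
--                     g[ci][cj] = 3
--                     # pushed so that the pop order is up, down, left, right
--                     stack += [(ci, cj + 1), (ci, cj - 1), (ci + 1, cj), (ci - 1, cj)]
--             if terr:
--                 territorios.append(tuple(sorted(terr)))
--     for i in range(len(g)):
--         g[i][:] = [2 if v == 3 else v for v in g[i]]
--     return tuple(sorted(territorios, key=lambda t: (t[0][1], t[0][0])))
-- ===== Notes on version B (the rewrite author's own statement) =====
-- stated objective: idiomatic
-- what changed: The recursive flood-fill helper is replaced by an iterative explicit-stack flood fill written inline (pop a cell, check, mark, push the four neighbours), and the element-wise restore pass by a per-row comprehension; B also avoids Python's recursion limit on large connected regions.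
-- outside the precondition, e.g. on obtem_territorios_vazios([[0, 0], [0], [0, 0], [2, 0]]): A returns ((('A', 1),),), B returns ((('A', 1),),)
import Mathlib
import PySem

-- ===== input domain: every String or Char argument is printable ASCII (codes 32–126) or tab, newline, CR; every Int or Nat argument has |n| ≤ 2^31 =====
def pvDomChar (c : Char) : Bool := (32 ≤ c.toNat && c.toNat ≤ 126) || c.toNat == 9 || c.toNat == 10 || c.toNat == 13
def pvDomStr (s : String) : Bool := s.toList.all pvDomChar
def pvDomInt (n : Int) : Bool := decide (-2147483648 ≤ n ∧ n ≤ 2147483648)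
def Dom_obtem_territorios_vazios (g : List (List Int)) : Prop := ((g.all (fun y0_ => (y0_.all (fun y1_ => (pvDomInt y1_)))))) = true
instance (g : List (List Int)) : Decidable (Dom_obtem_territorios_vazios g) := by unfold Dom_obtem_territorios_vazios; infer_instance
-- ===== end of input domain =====

-- B replaces A's recursive flood fill by an iterative explicit-stack flood fill (idiomatic, no
-- recursion-depth limit); return values agree.  Both Pythons mutate g in place (mark 3, then
-- restore every 3 — including pre-existing ones — to 2); the equivalence proved here is about the
-- RETURN value only, so the restore pass (which never affects the return value) is not part of
-- the ports.

-- ===== PORT A =====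
-- number of cells equal to 2 (free intersections); used as the fuel bound for A's recursion and
-- as the termination measure of B's stack loop
def count2 (g : List (List Int)) : Nat := (g.map (fun r => r.countP (fun v => v == 2))).sum

-- termination helpers for the ports: marking a 2-cell as 3 strictly decreases count2
theorem countP2_set3 (l : List Int) (b : Nat) (hb : b < l.length) (h : l[b] = 2) :
    (l.set b (3 : Int)).countP (fun v => v == 2) < l.countP (fun v => v == 2) := by
  induction l generalizing b with
  | nil => simp at hb
  | cons x xs ih =>
    cases b with
    | zero => simp_all
    | succ b =>
      simp only [List.set_cons_succ, List.countP_cons]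
      have := ih b (by simpa using hb) (by simpa using h)
      omega

theorem count2_set_row (g : List (List Int)) (a : Nat) (ha : a < g.length) (r' : List Int)
    (h : r'.countP (fun v => v == 2) < g[a].countP (fun v => v == 2)) :
    count2 (g.set a r') < count2 g := by
  induction g generalizing a with
  | nil => simp at ha
  | cons x xs ih =>
    cases a with
    | zero => simp_all [count2]
    | succ a =>
      have := ih a (by simpa using ha) (by simpa using h)
      simp only [List.set_cons_succ, count2, List.map_cons, List.sum_cons] at *
      omega

theorem count2_mark_lt (g : List (List Int)) (i j : Int) (h0 : 0 ≤ i)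
    (h1 : i < (g.length : Int)) (h2 : 0 ≤ j)
    (hv : PySem.List.pyGetD (PySem.List.pyGetD g i []) j 0 = 2) :
    count2 (PySem.List.pySetD g i (PySem.List.pySetD (PySem.List.pyGetD g i []) j 3)) < count2 g := by
  have hi : i.toNat < g.length := by omega
  have hrow : PySem.List.pyGetD g i [] = g[i.toNat] := PySem.List.pyGetD_eq_getElem g [] h0 h1
  have hj : j.toNat < (g[i.toNat] : List Int).length := by
    by_contra hc
    rw [hrow] at hv
    rw [PySem.List.pyGetD_of_none] at hv
    · exact absurd hv (by decide)
    · rw [PySem.List.pyGet?_eq_none_iff, PySem.Raise.InRange]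
      omega
  have hvj : (g[i.toNat] : List Int)[j.toNat] = 2 := by
    rw [hrow, PySem.List.pyGetD_eq_getElem _ _ h2 (by omega)] at hv
    exact hv
  rw [hrow, PySem.List.pySetD_of_nonneg _ _ h0, PySem.List.pySetD_of_nonneg _ _ h2]
  exact count2_set_row g i.toNat hi _ (countP2_set3 _ j.toNat hj hvj)

def vizinhas (i j : Int) : List (Int × Int) :=
  [(i - 1, j), (i + 1, j), (i, j - 1), (i, j + 1)]

-- A's recursive busca_territorio; state = (terr, g).  Python's recursion carries no fuel; the
-- Nat fuel only makes the same computation total (count2 g + 1 is enough, proved below).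
def busca_territorio : Nat → Int → Int →
    PySem.Set (String × Int) × List (List Int) →
    PySem.Set (String × Int) × List (List Int)
  | 0, _, _, st => st
  | f + 1, i, j, st =>
    if i < 0 ∨ (st.2.length : Int) ≤ i ∨ j < 0 ∨
        ((PySem.List.pyGetD st.2 0 []).length : Int) ≤ j ∨
        PySem.List.pyGetD (PySem.List.pyGetD st.2 i []) j 0 ≠ 2 then st
    else
      (vizinhas i j).foldl (fun st' p => busca_territorio f p.1 p.2 st')
        (PySem.Set.add st.1 (String.ofList [Char.ofNat (j + 65).toNat], (st.2.length : Int) - i),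
         PySem.List.pySetD st.2 i (PySem.List.pySetD (PySem.List.pyGetD st.2 i []) j 3))

def obtem_territorios_vazios (g : List (List Int)) : List (List (String × Int)) :=
  -- state: (current grid, territorios)
  let st := (PySem.List.pyRange 0 (g.length : Int) 1).foldl (fun st i =>
      (PySem.List.pyRange 0 ((PySem.List.pyGetD st.1 i []).length : Int) 1).foldl (fun st j =>
        if PySem.List.pyGetD (PySem.List.pyGetD st.1 i []) j 0 = 2 then
          let res := busca_territorio (count2 st.1 + 1) i j (PySem.Set.empty, st.1)
          if res.1 ≠ [] then (res.2, st.2 ++ [PySem.List.sorted2 res.1 Prod.fst Prod.snd])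
          else (res.2, st.2)
        else st) st) (g, ([] : List (List (String × Int))))
  PySem.List.sorted2 st.2 (fun t => (PySem.List.pyGetD t 0 ("", 0)).2)
    (fun t => (PySem.List.pyGetD t 0 ("", 0)).1)

-- ===== PORT B =====
-- iterative flood fill; the Lean worklist keeps the TOP of Python's stack at its HEAD, so
-- Python's pop() is the head and its extend([right, left, down, up]) prepends up,down,left,right
def floodB (st : PySem.Set (String × Int) × List (List Int)) (stack : List (Int × Int)) :
    PySem.Set (String × Int) × List (List Int) :=
  match stack with
  | [] => st
  | (ci, cj) :: rest =>
    if h : 0 ≤ ci ∧ ci < (st.2.length : Int) ∧ 0 ≤ cj ∧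
        cj < ((PySem.List.pyGetD st.2 0 []).length : Int) ∧
        PySem.List.pyGetD (PySem.List.pyGetD st.2 ci []) cj 0 = 2 then
      floodB (PySem.Set.add st.1 (String.ofList [Char.ofNat (cj + 65).toNat], (st.2.length : Int) - ci),
              PySem.List.pySetD st.2 ci (PySem.List.pySetD (PySem.List.pyGetD st.2 ci []) cj 3))
        ((ci - 1, cj) :: (ci + 1, cj) :: (ci, cj - 1) :: (ci, cj + 1) :: rest)
    else floodB st rest
termination_by (count2 st.2, stack.length)
decreasing_by
  · exact Prod.Lex.left _ _ (count2_mark_lt _ _ _ h.1 h.2.1 h.2.2.1 h.2.2.2.2)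
  · exact Prod.Lex.right _ (by simp)

def obtem_territorios_vazios_alt (g : List (List Int)) : List (List (String × Int)) :=
  let st := (PySem.List.pyRange 0 (g.length : Int) 1).foldl (fun st i =>
      (PySem.List.pyRange 0 ((PySem.List.pyGetD st.1 i []).length : Int) 1).foldl (fun st j =>
        if PySem.List.pyGetD (PySem.List.pyGetD st.1 i []) j 0 ≠ 2 then st
        else
          let res := floodB (PySem.Set.empty, st.1) [(i, j)]
          if res.1 ≠ [] then (res.2, st.2 ++ [PySem.List.sorted2 res.1 Prod.fst Prod.snd])
          else (res.2, st.2)) st) (g, ([] : List (List (String × Int))))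
  PySem.List.sorted2 st.2 (fun t => (PySem.List.pyGetD t 0 ("", 0)).2)
    (fun t => (PySem.List.pyGetD t 0 ("", 0)).1)

-- ===== PRECONDITION & SPEC =====
-- Pre_ excludes ragged grids on which the flood fill can index past the end of a row shorter than
-- the first row and raise IndexError; it keeps every grid whose rows are all at least as long as
-- the first row, and every grid with no 2 at all (there the flood fill never runs).
def Pre_obtem_territorios_vazios (g : List (List Int)) : Prop :=
  (∀ r ∈ g, (g.headD []).length ≤ r.length) ∨ (∀ r ∈ g, (2 : Int) ∉ r)
instance (g : List (List Int)) : Decidable (Pre_obtem_territorios_vazios g) := by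
  unfold Pre_obtem_territorios_vazios; infer_instance
def pvWitness_obtem_territorios_vazios : List (List Int) := [[2, 1], [0, 2]]
def Spec_obtem_territorios_vazios (g : List (List Int)) (out : List (List (String × Int))) : Prop := out = obtem_territorios_vazios_alt g
instance (g : List (List Int)) (out : List (List (String × Int))) : Decidable (Spec_obtem_territorios_vazios g out) := by unfold Spec_obtem_territorios_vazios; infer_instance

-- ===== CLAIM (what is proved, stated in full; the proofs are below) =====
def Claim_equal_obtem_territorios_vazios : Prop := ∀ (g : List (List Int)), Dom_obtem_territorios_vazios g → Pre_obtem_territorios_vazios g → Spec_obtem_territorios_vazios g (obtem_territorios_vazios g)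

-- ===== LEMMAS AND PROOFS =====

theorem flood_append (st : PySem.Set (String × Int) × List (List Int))
    (l1 l2 : List (Int × Int)) :
    floodB st (l1 ++ l2) = floodB (floodB st l1) l2 := by
  induction st, l1 using floodB.induct with
  | case1 st => simp [floodB]
  | case2 st ci cj rest h ih =>
    rw [floodB, dif_pos h, List.cons_append, floodB, dif_pos h]
    exact ih
  | case3 st ci cj rest h ih =>
    rw [floodB, dif_neg h, List.cons_append, floodB, dif_neg h]
    exact ih

theorem busca_fold_mono (f : Nat) :
    ∀ (l : List (Int × Int)) (st : PySem.Set (String × Int) × List (List Int)),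
      count2 ((l.foldl (fun st' p => busca_territorio f p.1 p.2 st') st).2) ≤ count2 st.2 := by
  induction f with
  | zero =>
    intro l st
    simp [busca_territorio]
  | succ f ihf =>
    have single : ∀ (i j : Int) st,
        count2 ((busca_territorio (f + 1) i j st).2) ≤ count2 st.2 := by
      intro i j st
      rw [busca_territorio]
      split_ifs with hc
      · exact le_rfl
      · have hv : PySem.List.pyGetD (PySem.List.pyGetD st.2 i []) j 0 = 2 := by omega
        have hlt := count2_mark_lt st.2 i j (by omega) (by omega) (by omega) hv
        exact le_trans (ihf _ _) (le_of_lt hlt)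
    intro l
    induction l with
    | nil => intro st; exact le_rfl
    | cons p rest ih =>
      intro st
      exact le_trans (ih _) (single p.1 p.2 st)

theorem busca_single_mono (f : Nat) (i j : Int)
    (st : PySem.Set (String × Int) × List (List Int)) :
    count2 ((busca_territorio f i j st).2) ≤ count2 st.2 := by
  simpa using busca_fold_mono f [(i, j)] st

theorem busca_eq_flood : ∀ (n f : Nat) (i j : Int)
    (st : PySem.Set (String × Int) × List (List Int)),
    count2 st.2 ≤ n → count2 st.2 < f →
    busca_territorio f i j st = floodB st [(i, j)] := by
  intro n
  induction n with
  | zero =>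
    intro f i j st hn hf
    obtain ⟨f', rfl⟩ : ∃ f', f = f' + 1 := ⟨f - 1, by omega⟩
    by_cases hB : 0 ≤ i ∧ i < (st.2.length : Int) ∧ 0 ≤ j ∧
        j < ((PySem.List.pyGetD st.2 0 []).length : Int) ∧
        PySem.List.pyGetD (PySem.List.pyGetD st.2 i []) j 0 = 2
    · exact absurd (count2_mark_lt st.2 i j hB.1 hB.2.1 hB.2.2.1 hB.2.2.2.2) (by omega)
    · rw [busca_territorio, if_pos (by omega), floodB, dif_neg hB, floodB]
  | succ n ihn =>
    intro f i j st hn hf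
    obtain ⟨f', rfl⟩ : ∃ f', f = f' + 1 := ⟨f - 1, by omega⟩
    by_cases hB : 0 ≤ i ∧ i < (st.2.length : Int) ∧ 0 ≤ j ∧
        j < ((PySem.List.pyGetD st.2 0 []).length : Int) ∧
        PySem.List.pyGetD (PySem.List.pyGetD st.2 i []) j 0 = 2
    · rw [busca_territorio, if_neg (by omega), floodB, dif_pos hB]
      set st0 : PySem.Set (String × Int) × List (List Int) :=
        (PySem.Set.add st.1 (String.ofList [Char.ofNat (j + 65).toNat], (st.2.length : Int) - i),
         PySem.List.pySetD st.2 i (PySem.List.pySetD (PySem.List.pyGetD st.2 i []) j 3)) with hst0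
      have hlt : count2 st0.2 < count2 st.2 :=
        count2_mark_lt st.2 i j hB.1 hB.2.1 hB.2.2.1 hB.2.2.2.2
      have h0n : count2 st0.2 ≤ n := by omega
      simp only [vizinhas, List.foldl_cons, List.foldl_nil]
      have e1 : busca_territorio f' (i - 1) j st0 = floodB st0 [(i - 1, j)] :=
        ihn f' _ _ st0 h0n (by omega)
      have m1 : count2 (floodB st0 [(i - 1, j)]).2 ≤ count2 st0.2 := by
        rw [← e1]; exact busca_single_mono _ _ _ _
      have e2 : busca_territorio f' (i + 1) j (floodB st0 [(i - 1, j)]) =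
          floodB (floodB st0 [(i - 1, j)]) [(i + 1, j)] :=
        ihn f' _ _ _ (by omega) (by omega)
      have m2 : count2 (floodB (floodB st0 [(i - 1, j)]) [(i + 1, j)]).2 ≤
          count2 (floodB st0 [(i - 1, j)]).2 := by
        rw [← e2]; exact busca_single_mono _ _ _ _
      have e3 : busca_territorio f' i (j - 1) (floodB (floodB st0 [(i - 1, j)]) [(i + 1, j)]) =
          floodB (floodB (floodB st0 [(i - 1, j)]) [(i + 1, j)]) [(i, j - 1)] :=
        ihn f' _ _ _ (by omega) (by omega)
      have m3 : count2 (floodB (floodB (floodB st0 [(i - 1, j)]) [(i + 1, j)]) [(i, j - 1)]).2 ≤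
          count2 (floodB (floodB st0 [(i - 1, j)]) [(i + 1, j)]).2 := by
        rw [← e3]; exact busca_single_mono _ _ _ _
      have e4 : busca_territorio f' i (j + 1)
            (floodB (floodB (floodB st0 [(i - 1, j)]) [(i + 1, j)]) [(i, j - 1)]) =
          floodB (floodB (floodB (floodB st0 [(i - 1, j)]) [(i + 1, j)]) [(i, j - 1)]) [(i, j + 1)] :=
        ihn f' _ _ _ (by omega) (by omega)
      rw [e1, e2, e3, e4]
      conv_rhs => rw [show ([(i - 1, j), (i + 1, j), (i, j - 1), (i, j + 1)] : List (Int × Int)) =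
          (([(i - 1, j)] ++ [(i + 1, j)]) ++ [(i, j - 1)]) ++ [(i, j + 1)] from rfl,
        flood_append, flood_append, flood_append]
    · rw [busca_territorio, if_pos (by omega), floodB, dif_neg hB, floodB]

theorem obtem_eq (g : List (List Int)) :
    obtem_territorios_vazios g = obtem_territorios_vazios_alt g := by
  simp only [obtem_territorios_vazios, obtem_territorios_vazios_alt]
  have h : (fun (st : List (List Int) × List (List (String × Int))) (i : Int) =>
        (PySem.List.pyRange 0 ((PySem.List.pyGetD st.1 i []).length : Int) 1).foldl
          (fun st j =>
            if PySem.List.pyGetD (PySem.List.pyGetD st.1 i []) j 0 = 2 then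
              let res := busca_territorio (count2 st.1 + 1) i j (PySem.Set.empty, st.1)
              if res.1 ≠ [] then (res.2, st.2 ++ [PySem.List.sorted2 res.1 Prod.fst Prod.snd])
              else (res.2, st.2)
            else st) st) =
      (fun st i =>
        (PySem.List.pyRange 0 ((PySem.List.pyGetD st.1 i []).length : Int) 1).foldl
          (fun st j =>
            if PySem.List.pyGetD (PySem.List.pyGetD st.1 i []) j 0 ≠ 2 then st
            else
              let res := floodB (PySem.Set.empty, st.1) [(i, j)]
              if res.1 ≠ [] then (res.2, st.2 ++ [PySem.List.sorted2 res.1 Prod.fst Prod.snd])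
              else (res.2, st.2)) st) := by
    funext st i
    have h2 : (fun (st : List (List Int) × List (List (String × Int))) (j : Int) =>
          if PySem.List.pyGetD (PySem.List.pyGetD st.1 i []) j 0 = 2 then
            let res := busca_territorio (count2 st.1 + 1) i j (PySem.Set.empty, st.1)
            if res.1 ≠ [] then (res.2, st.2 ++ [PySem.List.sorted2 res.1 Prod.fst Prod.snd])
            else (res.2, st.2)
          else st) =
        (fun st j =>
          if PySem.List.pyGetD (PySem.List.pyGetD st.1 i []) j 0 ≠ 2 then st
          else
            let res := floodB (PySem.Set.empty, st.1) [(i, j)]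
            if res.1 ≠ [] then (res.2, st.2 ++ [PySem.List.sorted2 res.1 Prod.fst Prod.snd])
            else (res.2, st.2)) := by
      funext st j
      by_cases hv : PySem.List.pyGetD (PySem.List.pyGetD st.1 i []) j 0 = 2
      · conv_rhs => rw [if_neg (not_not_intro hv)]
        rw [if_pos hv,
          busca_eq_flood (count2 st.1) (count2 st.1 + 1) i j (PySem.Set.empty, st.1)
            le_rfl (Nat.lt_succ_self _)]
      · rw [if_neg hv, if_pos hv]
    rw [h2]
  rw [h]

-- ===== VERDICT (by name: the statement is the Claim_ definition above) =====
theorem obtem_territorios_vazios_spec : Claim_equal_obtem_territorios_vazios := by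
  intro g _ _
  unfold Spec_obtem_territorios_vazios
  exact obtem_eq g
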